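-- pv_equiv track=rewrite | github.com/ketanpurohit0/python | elements_of_python_programming/StrSymmetryPoint.py | solution
-- ===== SOURCE A (Python) =====
-- from collections import  deque
--
-- def solution(i):
--     if len(i) % 2 == 0:
--         return -1
--     elif len(i) == 1:
--         return 0
--
--     dq = deque(i)
--
--     all_match = True
--     possible_answer = (len(i)-1)//2
--     for n in range(0, possible_answer):
--         all_match = dq.popleft() == dq.pop()
--         if not all_match:
--             break
--
--     if all_match:
--         return possible_answer
--     else:
--         return -1
-- ===== SOURCE B (Python) =====
-- def solution(i):
--     if len(i) % 2 == 0: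
--         return -1
--     return (len(i) - 1) // 2 if i == i[::-1] else -1
-- ===== Notes on version B (the rewrite author's own statement) =====
-- stated objective: simpler
-- what changed: Replaces the deque two-pointer loop (popping from both ends with an early break) by a whole reversed-copy comparison i == i[::-1]; the len==1 special case disappears since a singleton equals its reverse.
import Mathlib
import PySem

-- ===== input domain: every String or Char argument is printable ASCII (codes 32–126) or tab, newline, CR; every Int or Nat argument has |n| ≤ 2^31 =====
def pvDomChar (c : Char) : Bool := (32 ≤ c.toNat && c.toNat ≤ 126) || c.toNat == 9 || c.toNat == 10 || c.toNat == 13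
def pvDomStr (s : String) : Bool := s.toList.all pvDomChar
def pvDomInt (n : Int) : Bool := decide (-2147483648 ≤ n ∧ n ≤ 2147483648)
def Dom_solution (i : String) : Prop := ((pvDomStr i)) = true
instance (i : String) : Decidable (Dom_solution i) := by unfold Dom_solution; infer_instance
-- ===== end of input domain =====

-- B replaces A's deque two-pointer loop by a whole reversed-copy comparison (simpler; same cost).

-- ===== PORT A =====
-- the 'for n in range(0, possible_answer)' loop over the deque: each iteration pops the
-- front and the back, compares them, and breaks on mismatch.  The deque always has
-- 2*k+1 elements when k iterations remain (odd length, guards above), so the pops never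
-- hit an empty deque; the 'false' fallthrough for an empty pop (Python's IndexError) is
-- unreachable on the inputs A's code reaches it with.
def solutionLoop : List Char → Nat → Bool
  | _, 0 => true
  | dq, k + 1 =>
    match dq.head?, (dq.drop 1).getLast? with
    | some f, some b => if f = b then solutionLoop ((dq.drop 1).dropLast) k else false
    | _, _ => false

def solution (i : String) : Int :=
  let l := i.toList
  if l.length % 2 = 0 then -1
  else if l.length = 1 then 0
  else
    let possible_answer : Int := PySem.Int.floordiv ((l.length : Int) - 1) 2
    if solutionLoop l (((l.length : Nat) - 1) / 2) then possible_answer else -1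

-- ===== PORT B =====
-- i == i[::-1] : string equality is code-point list equality; i[::-1] reverses (PySem.List.slice?_none_none_neg_one)
def solution_alt (i : String) : Int :=
  let l := i.toList
  if l.length % 2 = 0 then -1
  else if l = l.reverse then PySem.Int.floordiv ((l.length : Int) - 1) 2 else -1

-- ===== PRECONDITION & SPEC =====
def Spec_solution (i : String) (out : Int) : Prop := out = solution_alt i
instance (i : String) (out : Int) : Decidable (Spec_solution i out) := by unfold Spec_solution; infer_instance

-- ===== CLAIM (what is proved, stated in full; the proofs are below) =====
def Claim_equal_solution : Prop := ∀ (i : String), Dom_solution i → Spec_solution i (solution i)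

-- ===== LEMMAS AND PROOFS =====

-- A list of length 2k+1 passes the two-pointer scan iff it is a palindrome.
theorem solutionLoop_iff : ∀ (k : Nat) (l : List Char), l.length = 2 * k + 1 →
    (solutionLoop l k = true ↔ l.reverse = l) := by
  intro k
  induction k with
  | zero =>
    intro l hl
    match l, hl with
    | [a], _ => simp [solutionLoop]
  | succ k ih =>
    intro l hl
    match l, hl with
    | f :: t, hl =>
      have ht : t ≠ [] := by intro h; simp [h] at hl
      have hdec : t = t.dropLast ++ [t.getLast ht] := (List.dropLast_append_getLast ht).symm
      set m := t.dropLast with hm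
      set b := t.getLast ht with hb
      have hml : m.length = 2 * k + 1 := by
        have := congrArg List.length hdec
        simp at this
        simp at hl
        omega
      have hgl : t.getLast? = some b := List.getLast?_eq_some_getLast ht
      have hstep : solutionLoop (f :: t) (k + 1)
          = (if f = b then solutionLoop m k else false) := by
        simp only [solutionLoop, List.head?, List.drop_one, List.tail_cons, hgl]
        rcases (inferInstance : Decidable (f = b)) with h | h
        · simp [h]
        · simp [h]
          rfl
      rw [hstep]
      constructor
      · intro hrun
        by_cases hfb : f = b
        · simp only [hfb, if_true] at hrun
          have hpal : m.reverse = m := (ih m hml).mp hrun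
          conv_lhs => rw [hdec]
          conv_rhs => rw [hdec]
          simp [hfb, hpal]
        · simp [hfb] at hrun
      · intro hrev
        conv at hrev => rw [hdec]
        simp only [List.reverse_cons, List.reverse_append, List.reverse_cons,
          List.reverse_nil, List.nil_append, List.cons_append] at hrev
        have hfb : b = f := by
          have := congrArg (fun xs => List.head? xs) hrev
          simpa using this
        have htail : m.reverse ++ [f] = m ++ [b] := by
          have := congrArg (fun xs => List.tail xs) hrev
          simpa using this
        have hpal : m.reverse = m := by
          have h2 : m.reverse ++ [f] = m ++ [f] := by rw [htail, hfb]
          simpa using h2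
        simp [hfb.symm, (ih m hml).mpr hpal]

theorem solution_spec : Claim_equal_solution := by
  intro i _
  unfold Spec_solution solution solution_alt
  set l := i.toList with hl
  by_cases he : l.length % 2 = 0
  · simp [he]
  · simp only [he, if_false]
    by_cases h1 : l.length = 1
    · -- length-1: A returns 0; B: a singleton is its own reverse, and (1-1)//2 = 0
      match l, h1 with
      | [a], _ =>
        have h0 : PySem.Int.floordiv ((1:Int) - 1) 2 = 0 := by decide
        simp
    · simp only [h1, if_false]
      obtain ⟨k, hk⟩ : ∃ k, l.length = 2 * k + 1 := ⟨l.length / 2, by omega⟩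
      have hmid : ((l.length : Nat) - 1) / 2 = k := by omega
      have hiff := solutionLoop_iff k l hk
      rw [hmid]
      by_cases hp : l.reverse = l
      · rw [if_pos (show (solutionLoop l k = true) from hiff.mpr hp), if_pos hp.symm]
      · have hb : solutionLoop l k = false := by
          cases h : solutionLoop l k with
          | true => exact absurd (hiff.mp h) hp
          | false => rfl
        rw [hb, if_neg (by simp), if_neg (fun h => hp h.symm)]
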